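-- pv_equiv track=rewrite | github.com/alanqamarqo-dev/your-repo | backup_20251208_214555/scripts/extract_medical_grounding.py | find_char_matches
-- ===== SOURCE A (Python) =====
-- from typing import List, Optional
--
-- def find_char_matches(answer: str, snippet: str, provenance_text: str = None) -> List[dict]:
--     """Find character-level matches of `snippet` inside `answer`.
--
--     If direct match fails, try sliding-window substring matching with decreasing
--     window sizes. If that also fails, try extracting long substrings from
--     `provenance_text` and then searching those in the answer.
--     """
--     if not snippet or not answer:
--         return []
--
--     # direct exact match
--     idx = answer.find(snippet)
--     if idx != -1:
--         return [{'start': idx, 'end': idx + len(snippet), 'match_len': len(snippet)}]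
--
--     s = snippet
--     L = len(s)
--     best = {'start': -1, 'end': -1, 'match_len': 0, 'fragment': ''}
--
--     # sliding-window search: try larger windows first, slide by 1 for accuracy
--     max_w = min(200, L)
--     min_w = 30
--     for w in range(max_w, min_w - 1, -5):
--         for i in range(0, L - w + 1):
--             part = s[i:i + w]
--             j = answer.find(part)
--             if j != -1 and w > best['match_len']:
--                 best = {'start': j, 'end': j + w, 'match_len': w, 'fragment': part}
--         if best['match_len']:
--             break
--
--     # if nothing found, try to match via provenance_text: find long substrings there,
--     # then attempt to locate them inside the answer
--     if not best['match_len'] and provenance_text: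
--         P = provenance_text
--         # take long parts from provenance and attempt to locate in answer
--         cand_len = min(300, len(P))
--         for w in range(cand_len, min_w - 1, -20):
--             for i in range(0, len(P) - w + 1, 10):
--                 part = P[i:i + w]
--                 if len(part.strip()) < 40:
--                     continue
--                 j = answer.find(part)
--                 if j != -1 and w > best['match_len']:
--                     best = {'start': j, 'end': j + w, 'match_len': w, 'fragment': part}
--             if best['match_len']:
--                 break
--
--     if best['match_len']:
--         return [{'start': best['start'], 'end': best['end'], 'match_len': best['match_len']}]
--     return []
-- ===== SOURCE B (Python) =====
-- def find_char_matches(answer, snippet, provenance_text=None):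
--     """Start-position-major rewrite: for each start, take the largest window that
--     matches, then keep the overall best (largest window, earliest start)."""
--     if not snippet or not answer:
--         return []
--
--     idx = answer.find(snippet)
--     if idx != -1:
--         return [{'start': idx, 'end': idx + len(snippet), 'match_len': len(snippet)}]
--
--     s = snippet
--     L = len(s)
--     ws = range(min(200, L), 29, -5)
--
--     best = None  # (w, i)
--     for i in range(L):
--         m = next((w for w in ws
--                   if w <= L - i and s[i:i + w] in answer), None)
--         if m is not None and (best is None or m > best[0]):
--             best = (m, i)
--
--     if best is None and provenance_text:
--         P = provenance_text
--         ws2 = range(min(300, len(P)), 29, -20)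
--         for i in range(0, len(P), 10):
--             m = next((w for w in ws2
--                       if w <= len(P) - i
--                       and len(P[i:i + w].strip()) >= 40
--                       and P[i:i + w] in answer), None)
--             if m is not None and (best is None or m > best[0]):
--                 best = (m, i)
--         if best is not None:
--             w, i = best
--             j = answer.find(P[i:i + w])
--             return [{'start': j, 'end': j + w, 'match_len': w}]
--         return []
--
--     if best is not None:
--         w, i = best
--         j = answer.find(s[i:i + w])
--         return [{'start': j, 'end': j + w, 'match_len': w}]
--     return []
-- ===== Notes on version B (the rewrite author's own statement) =====
-- stated objective: alternative
-- what changed: A scans window sizes in the outer loop (largest first, breaking on the first size that matches anywhere); B swaps the loop nesting: it scans start positions once and, per start, takes the first (largest) matching window size, keeping the overall best (window, start) pair as an option, in both the snippet and the provenance phase.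
import Mathlib
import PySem

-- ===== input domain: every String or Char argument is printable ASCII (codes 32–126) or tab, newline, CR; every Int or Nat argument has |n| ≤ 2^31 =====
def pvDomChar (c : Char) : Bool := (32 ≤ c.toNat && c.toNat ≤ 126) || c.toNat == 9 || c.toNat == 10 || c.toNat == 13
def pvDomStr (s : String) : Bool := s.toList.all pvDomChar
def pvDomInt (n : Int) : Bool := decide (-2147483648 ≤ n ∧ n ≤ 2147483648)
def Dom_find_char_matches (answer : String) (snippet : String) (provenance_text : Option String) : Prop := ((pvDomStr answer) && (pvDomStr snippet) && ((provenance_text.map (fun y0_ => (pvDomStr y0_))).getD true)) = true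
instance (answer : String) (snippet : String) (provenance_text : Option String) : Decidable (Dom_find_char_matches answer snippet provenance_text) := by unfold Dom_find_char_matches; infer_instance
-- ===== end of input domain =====

-- B re-implements A's window-size-major double scan as a start-position-major scan
-- (per start, first matching window size; global best kept as an option pair):
-- a different traversal order of the same search space, same results ('alternative').

-- ===== PORT A =====
-- A's `best` dict has the fixed keys start/end/match_len/fragment; ported as a record.
structure PvBest where
  start : Int
  stop : Int
  matchLen : Int
  fragment : String
deriving DecidableEq, Repr

-- inner loop of A's snippet sliding-window phase (one window size w)
def pvInnerA1 (answer s : String) (L w : Int) (b : PvBest) : PvBest :=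
  (PySem.List.pyRange 0 (L - w + 1) 1).foldl (fun b i =>
    let part := PySem.Str.slice s (some i) (some (i + w))
    let j := PySem.Str.find answer part
    if j ≠ -1 ∧ w > b.matchLen then ⟨j, j + w, w, part⟩ else b) b

-- A's outer loop over window sizes, with the `break` on first success
def pvOuterA1 (answer s : String) (L : Int) : List Int → PvBest → PvBest
  | [], b => b
  | w :: ws, b =>
    let b' := pvInnerA1 answer s L w b
    if b'.matchLen ≠ 0 then b' else pvOuterA1 answer s L ws b'

-- inner loop of A's provenance phase (one window size w; the `continue` on short strips)
def pvInnerA2 (answer P : String) (w : Int) (b : PvBest) : PvBest :=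
  (PySem.List.pyRange 0 (PySem.Str.len P - w + 1) 10).foldl (fun b i =>
    let part := PySem.Str.slice P (some i) (some (i + w))
    if PySem.Str.len (PySem.Str.strip part) < 40 then b
    else
      let j := PySem.Str.find answer part
      if j ≠ -1 ∧ w > b.matchLen then ⟨j, j + w, w, part⟩ else b) b

def pvOuterA2 (answer P : String) : List Int → PvBest → PvBest
  | [], b => b
  | w :: ws, b =>
    let b' := pvInnerA2 answer P w b
    if b'.matchLen ≠ 0 then b' else pvOuterA2 answer P ws b'

def find_char_matches (answer : String) (snippet : String) (provenance_text : Option String) : List (List (String × Int)) :=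
  if snippet = "" ∨ answer = "" then []
  else
    let idx := PySem.Str.find answer snippet
    if idx ≠ -1 then
      [[("start", idx), ("end", idx + PySem.Str.len snippet), ("match_len", PySem.Str.len snippet)]]
    else
      let s := snippet
      let L := PySem.Str.len s
      let best := PvBest.mk (-1) (-1) 0 ""
      let max_w := min 200 L
      let best := pvOuterA1 answer s L (PySem.List.pyRange max_w 29 (-5)) best
      -- Python truthiness of the optional string: None and "" are both falsy; ported via getD ""
      let best :=
        if best.matchLen = 0 then
          let P := provenance_text.getD ""
          if P = "" then best
          else pvOuterA2 answer P (PySem.List.pyRange (min 300 (PySem.Str.len P)) 29 (-20)) best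
        else best
      if best.matchLen ≠ 0 then
        [[("start", best.start), ("end", best.stop), ("match_len", best.matchLen)]]
      else []

-- ===== PORT B =====
-- B's per-start scan: `next((w for w in ws if …), None)` is `ws.find?`; the running
-- best `(w, i)` pair is an Option, updated when the new window is strictly larger.
def pvBestB (ws : List Int) (q : Int → Int → Bool) (I : List Int) : Option (Int × Int) :=
  I.foldl (fun best i =>
    match ws.find? (fun w => q w i) with
    | none => best
    | some m =>
      match best with
      | none => some (m, i)
      | some b => if m > b.1 then some (m, i) else best) none

def find_char_matches_alt (answer : String) (snippet : String) (provenance_text : Option String) : List (List (String × Int)) :=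
  if snippet = "" ∨ answer = "" then []
  else
    let idx := PySem.Str.find answer snippet
    if idx ≠ -1 then
      [[("start", idx), ("end", idx + PySem.Str.len snippet), ("match_len", PySem.Str.len snippet)]]
    else
      let s := snippet
      let L := PySem.Str.len s
      let ws := PySem.List.pyRange (min 200 L) 29 (-5)
      match pvBestB ws (fun w i => decide (w ≤ L - i) && PySem.Str.isIn (PySem.Str.slice s (some i) (some (i + w))) answer) (PySem.List.pyRange 0 L 1) with
      | some (w, i) =>
        let j := PySem.Str.find answer (PySem.Str.slice s (some i) (some (i + w)))
        [[("start", j), ("end", j + w), ("match_len", w)]]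
      | none =>
        -- Python truthiness of the optional string: None and "" are both falsy; ported via getD ""
        let P := provenance_text.getD ""
        if P = "" then []
        else
            let lenP := PySem.Str.len P
            let ws2 := PySem.List.pyRange (min 300 lenP) 29 (-20)
            match pvBestB ws2 (fun w i => decide (w ≤ lenP - i) && decide (40 ≤ PySem.Str.len (PySem.Str.strip (PySem.Str.slice P (some i) (some (i + w))))) && PySem.Str.isIn (PySem.Str.slice P (some i) (some (i + w))) answer) (PySem.List.pyRange 0 lenP 10) with
            | some (w, i) =>
              let j := PySem.Str.find answer (PySem.Str.slice P (some i) (some (i + w)))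
              [[("start", j), ("end", j + w), ("match_len", w)]]
            | none => []

-- ===== PRECONDITION & SPEC =====
def Spec_find_char_matches (answer : String) (snippet : String) (provenance_text : Option String) (out : List (List (String × Int))) : Prop := out = find_char_matches_alt answer snippet provenance_text
instance (answer : String) (snippet : String) (provenance_text : Option String) (out : List (List (String × Int))) : Decidable (Spec_find_char_matches answer snippet provenance_text out) := by unfold Spec_find_char_matches; infer_instance

-- ===== CLAIM (what is proved, stated in full; the proofs are below) =====
def Claim_equal_find_char_matches : Prop := ∀ (answer : String) (snippet : String) (provenance_text : Option String), Dom_find_char_matches answer snippet provenance_text → Spec_find_char_matches answer snippet provenance_text (find_char_matches answer snippet provenance_text)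

-- ===== LEMMAS AND PROOFS =====

-- `sub in a` and `a.find(sub) != -1` test the same thing
lemma pvIsIn_eq (a sub : String) :
    PySem.Str.isIn sub a = decide (PySem.Str.find a sub ≠ -1) := by
  by_cases h : sub.toList <:+: a.toList
  · rw [(PySem.Str.isIn_iff_infix sub a).2 h,
      decide_eq_true ((PySem.Str.find_ne_neg_one_iff a sub).2 h)]
  · have h2 : ¬ PySem.Str.find a sub ≠ -1 := fun hc => h ((PySem.Str.find_ne_neg_one_iff a sub).1 hc)
    have h1 : PySem.Str.isIn sub a = false := by
      cases hb : PySem.Str.isIn sub a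
      · rfl
      · exact absurd ((PySem.Str.isIn_iff_infix sub a).1 hb) h
    rw [h1, decide_eq_false h2]

lemma pvFind?_congr {α : Type} {p q : α → Bool} :
    ∀ (l : List α), (∀ x ∈ l, p x = q x) → l.find? p = l.find? q := by
  intro l h
  induction l with
  | nil => rfl
  | cons x l ih =>
    have hx := h x (by simp)
    simp only [List.find?_cons, hx]
    cases q x
    · exact ih (fun y hy => h y (by simp [hy]))
    · rfl

lemma pvFindSome?_congr {α β : Type} {f g : α → Option β} :
    ∀ (l : List α), (∀ x ∈ l, f x = g x) → l.findSome? f = l.findSome? g := by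
  intro l h
  induction l with
  | nil => rfl
  | cons x l ih =>
    rw [List.findSome?_cons, List.findSome?_cons, h x (by simp)]
    cases g x
    · exact ih (fun y hy => h y (by simp [hy]))
    · rfl

-- a Python range with a negative step is strictly decreasing
lemma pvPairwise_gt_pyRange_neg (a b s : Int) (hs : s < 0) :
    (PySem.List.pyRange a b s).Pairwise (· > ·) := by
  rw [PySem.List.pyRange_of_neg a b hs]
  rw [List.pairwise_map]
  refine List.pairwise_lt_range.imp ?_
  intro k k' hkk'
  have : s * (k' : Int) < s * (k : Int) :=
    mul_lt_mul_of_neg_left (by exact_mod_cast hkk') hs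
  omega

-- restricting a positive-step range by an upper bound on its elements
lemma pvFind?_pyRange_restrict (t : Int) (ht : 0 < t) (b c : Int) (h0 : 0 < c) (hcb : c ≤ b)
    (p : Int → Bool) :
    (PySem.List.pyRange 0 c t).find? p =
      (PySem.List.pyRange 0 b t).find? (fun i => decide (i < c) && p i) := by
  rw [PySem.List.pyRange_of_pos 0 c ht, PySem.List.pyRange_of_pos 0 b ht]
  rw [if_pos (by omega : (0:Int) < c), if_pos (by omega : (0:Int) < b)]
  set qc : Int := (c - 0 + t - 1) / t with hqc
  set qb : Int := (b - 0 + t - 1) / t with hqb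
  have hqc0 : 0 ≤ qc := Int.ediv_nonneg (by omega) (by omega)
  have hqcb : qc ≤ qb := Int.ediv_le_ediv ht (by omega)
  have hle : qc.toNat ≤ qb.toNat := Int.toNat_le_toNat hqcb
  have hmul_le : qc * t ≤ c + t - 1 := by
    have h := Int.ediv_mul_le (c - 0 + t - 1) (ne_of_gt ht)
    rw [← hqc] at h
    linarith
  have hc_le : c ≤ t * qc := by
    have h2 := Int.lt_ediv_add_one_mul_self (c - 0 + t - 1) ht
    rw [← hqc] at h2
    have e : (qc + 1) * t = qc * t + t := by ring
    have hcm : qc * t = t * qc := mul_comm _ _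
    linarith
  have hlt_c : ∀ k : Nat, k < qc.toNat → 0 + t * (k : Int) < c := by
    intro k hk
    have hkq : (k : Int) ≤ qc - 1 := by omega
    have hmul : t * (k : Int) ≤ t * (qc - 1) := mul_le_mul_of_nonneg_left hkq (le_of_lt ht)
    have hdist : t * (qc - 1) = t * qc - t := by ring
    have hcm : qc * t = t * qc := mul_comm _ _
    linarith
  have hnone : ∀ (d : List Nat), (∀ k ∈ d, qc.toNat ≤ k) →
      List.find? (fun i => decide (i < c) && p i) (d.map (fun (k : Nat) => 0 + t * (k : Int))) = none := by
    intro d hd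
    rw [List.find?_eq_none]
    intro x hx
    obtain ⟨k, hk, rfl⟩ := List.mem_map.1 hx
    have hkq : qc ≤ (k : Int) := by have := hd k hk; omega
    have hmul : t * qc ≤ t * (k : Int) := mul_le_mul_of_nonneg_left hkq (le_of_lt ht)
    have hge : ¬ (0 + t * (k : Int) < c) := by linarith
    rw [decide_eq_false hge]
    simp
  have hnb : qb.toNat = qc.toNat + (qb.toNat - qc.toNat) := (Nat.add_sub_cancel' hle).symm
  rw [hnb, List.range_add, List.map_append, List.find?_append]
  have hmem : ∀ k ∈ List.map (fun x => qc.toNat + x) (List.range (qb.toNat - qc.toNat)), qc.toNat ≤ k := by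
    intro k hk
    obtain ⟨x, _, rfl⟩ := List.mem_map.1 hk
    omega
  rw [hnone (List.map (fun x => qc.toNat + x) (List.range (qb.toNat - qc.toNat))) hmem]
  rw [Option.or_none]
  apply pvFind?_congr
  intro x hx
  obtain ⟨k, hk, rfl⟩ := List.mem_map.1 hx
  rw [List.mem_range] at hk
  rw [decide_eq_true (hlt_c k hk), Bool.true_and]

-- A's inner fold, generically: first matching index wins, later ones cannot beat w
lemma pvFold_stay (p : Int → Prop) [DecidablePred p] (mk : Int → PvBest) (w : Int) :
    ∀ (I : List Int) (b : PvBest), ¬ w > b.matchLen →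
      I.foldl (fun b i => if p i ∧ w > b.matchLen then mk i else b) b = b := by
  intro I
  induction I with
  | nil => intro b _; rfl
  | cons i I ih =>
    intro b hb
    simp only [List.foldl_cons]
    rw [if_neg (fun hc => hb hc.2)]
    exact ih b hb

lemma pvFold_inner (p : Int → Prop) [DecidablePred p] (mk : Int → PvBest) (w : Int)
    (hw : 0 < w) (hmk : ∀ i, (mk i).matchLen = w) :
    ∀ (I : List Int) (b : PvBest), b.matchLen = 0 →
      I.foldl (fun b i => if p i ∧ w > b.matchLen then mk i else b) b =
        (match I.find? (fun i => decide (p i)) with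
         | none => b
         | some i => mk i) := by
  intro I
  induction I with
  | nil => intro b _; rfl
  | cons i I ih =>
    intro b hb
    simp only [List.foldl_cons, List.find?_cons]
    by_cases hp : p i
    · rw [if_pos ⟨hp, by omega⟩, decide_eq_true hp]
      exact pvFold_stay p mk w I (mk i) (by rw [hmk i]; omega)
    · rw [if_neg (fun hc => hp hc.1), decide_eq_false hp]
      exact ih b hb

-- the best-record selected by an optional (window, start) pair
def pvSel (answer src : String) (b : PvBest) (wi : Option (Int × Int)) : PvBest :=
  match wi with
  | none => b
  | some (w, i) =>
    ⟨PySem.Str.find answer (PySem.Str.slice src (some i) (some (i + w))),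
     PySem.Str.find answer (PySem.Str.slice src (some i) (some (i + w))) + w, w,
     PySem.Str.slice src (some i) (some (i + w))⟩

-- characterization of A's phase-1 outer loop
lemma pvOuterA1_char (answer s : String) (L : Int) :
    ∀ (ws : List Int) (b : PvBest), b.matchLen = 0 → (∀ w ∈ ws, 0 < w) →
      pvOuterA1 answer s L ws b =
        pvSel answer s b (ws.findSome? (fun w =>
          ((PySem.List.pyRange 0 (L - w + 1) 1).find? (fun i =>
            decide (PySem.Str.find answer (PySem.Str.slice s (some i) (some (i + w))) ≠ -1))).map
          (fun i => (w, i)))) := by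
  intro ws
  induction ws with
  | nil => intro b _ _; rfl
  | cons w ws ih =>
    intro b hb hpos
    have hw : 0 < w := hpos w (by simp)
    have hinner : pvInnerA1 answer s L w b =
        (match (PySem.List.pyRange 0 (L - w + 1) 1).find? (fun i =>
            decide (PySem.Str.find answer (PySem.Str.slice s (some i) (some (i + w))) ≠ -1)) with
         | none => b
         | some i =>
           ⟨PySem.Str.find answer (PySem.Str.slice s (some i) (some (i + w))),
            PySem.Str.find answer (PySem.Str.slice s (some i) (some (i + w))) + w, w,
            PySem.Str.slice s (some i) (some (i + w))⟩) := by
      simp only [pvInnerA1]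
      exact pvFold_inner
        (fun i => PySem.Str.find answer (PySem.Str.slice s (some i) (some (i + w))) ≠ -1)
        (fun i => ⟨PySem.Str.find answer (PySem.Str.slice s (some i) (some (i + w))),
          PySem.Str.find answer (PySem.Str.slice s (some i) (some (i + w))) + w, w,
          PySem.Str.slice s (some i) (some (i + w))⟩) w hw (fun _ => rfl)
        (PySem.List.pyRange 0 (L - w + 1) 1) b hb
    rw [List.findSome?_cons]
    simp only [pvOuterA1, hinner]
    cases hfind : (PySem.List.pyRange 0 (L - w + 1) 1).find? (fun i =>
        decide (PySem.Str.find answer (PySem.Str.slice s (some i) (some (i + w))) ≠ -1)) with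
    | some i => simp only [Option.map_some, pvSel]; rw [if_pos (by show w ≠ 0; omega)]
    | none =>
      simp only [Option.map_none]
      rw [if_neg (by simp [hb])]
      exact ih b hb (fun w' hw' => hpos w' (by simp [hw']))

-- characterization of A's phase-2 outer loop
lemma pvOuterA2_char (answer P : String) :
    ∀ (ws : List Int) (b : PvBest), b.matchLen = 0 → (∀ w ∈ ws, 0 < w) →
      pvOuterA2 answer P ws b =
        pvSel answer P b (ws.findSome? (fun w =>
          ((PySem.List.pyRange 0 (PySem.Str.len P - w + 1) 10).find? (fun i =>
            decide (¬ PySem.Str.len (PySem.Str.strip (PySem.Str.slice P (some i) (some (i + w)))) < 40 ∧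
              PySem.Str.find answer (PySem.Str.slice P (some i) (some (i + w))) ≠ -1))).map
          (fun i => (w, i)))) := by
  intro ws
  induction ws with
  | nil => intro b _ _; rfl
  | cons w ws ih =>
    intro b hb hpos
    have hw : 0 < w := hpos w (by simp)
    have hfun : (fun (b : PvBest) (i : Int) =>
        if PySem.Str.len (PySem.Str.strip (PySem.Str.slice P (some i) (some (i + w)))) < 40 then b
        else
          if PySem.Str.find answer (PySem.Str.slice P (some i) (some (i + w))) ≠ -1 ∧ w > b.matchLen then
            ⟨PySem.Str.find answer (PySem.Str.slice P (some i) (some (i + w))),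
             PySem.Str.find answer (PySem.Str.slice P (some i) (some (i + w))) + w, w,
             PySem.Str.slice P (some i) (some (i + w))⟩
          else b) =
        (fun (b : PvBest) (i : Int) =>
          if (¬ PySem.Str.len (PySem.Str.strip (PySem.Str.slice P (some i) (some (i + w)))) < 40 ∧
              PySem.Str.find answer (PySem.Str.slice P (some i) (some (i + w))) ≠ -1) ∧ w > b.matchLen then
            ⟨PySem.Str.find answer (PySem.Str.slice P (some i) (some (i + w))),
             PySem.Str.find answer (PySem.Str.slice P (some i) (some (i + w))) + w, w,
             PySem.Str.slice P (some i) (some (i + w))⟩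
          else b) := by
      funext b i
      by_cases h1 : PySem.Str.len (PySem.Str.strip (PySem.Str.slice P (some i) (some (i + w)))) < 40
      · rw [if_pos h1, if_neg (fun hc => hc.1.1 h1)]
      · rw [if_neg h1]
        by_cases h2 : PySem.Str.find answer (PySem.Str.slice P (some i) (some (i + w))) ≠ -1
        · by_cases h3 : w > b.matchLen
          · rw [if_pos ⟨h2, h3⟩, if_pos ⟨⟨h1, h2⟩, h3⟩]
          · rw [if_neg (fun hc => h3 hc.2), if_neg (fun hc => h3 hc.2)]
        · rw [if_neg (fun hc => h2 hc.1), if_neg (fun hc => h2 hc.1.2)]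
    have hinner : pvInnerA2 answer P w b =
        (match (PySem.List.pyRange 0 (PySem.Str.len P - w + 1) 10).find? (fun i =>
            decide (¬ PySem.Str.len (PySem.Str.strip (PySem.Str.slice P (some i) (some (i + w)))) < 40 ∧
              PySem.Str.find answer (PySem.Str.slice P (some i) (some (i + w))) ≠ -1)) with
         | none => b
         | some i =>
           ⟨PySem.Str.find answer (PySem.Str.slice P (some i) (some (i + w))),
            PySem.Str.find answer (PySem.Str.slice P (some i) (some (i + w))) + w, w,
            PySem.Str.slice P (some i) (some (i + w))⟩) := by
      simp only [pvInnerA2]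
      rw [hfun]
      exact pvFold_inner
        (fun i => ¬ PySem.Str.len (PySem.Str.strip (PySem.Str.slice P (some i) (some (i + w)))) < 40 ∧
          PySem.Str.find answer (PySem.Str.slice P (some i) (some (i + w))) ≠ -1)
        (fun i => ⟨PySem.Str.find answer (PySem.Str.slice P (some i) (some (i + w))),
          PySem.Str.find answer (PySem.Str.slice P (some i) (some (i + w))) + w, w,
          PySem.Str.slice P (some i) (some (i + w))⟩) w hw (fun _ => rfl)
        (PySem.List.pyRange 0 (PySem.Str.len P - w + 1) 10) b hb
    rw [List.findSome?_cons]
    simp only [pvOuterA2, hinner]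
    cases hfind : (PySem.List.pyRange 0 (PySem.Str.len P - w + 1) 10).find? (fun i =>
        decide (¬ PySem.Str.len (PySem.Str.strip (PySem.Str.slice P (some i) (some (i + w)))) < 40 ∧
          PySem.Str.find answer (PySem.Str.slice P (some i) (some (i + w))) ≠ -1)) with
    | some i => simp only [Option.map_some, pvSel]; rw [if_pos (by show w ≠ 0; omega)]
    | none =>
      simp only [Option.map_none]
      rw [if_neg (by simp [hb])]
      exact ih b hb (fun w' hw' => hpos w' (by simp [hw']))

-- B's fold step, named for the proofs
def pvStep (ws : List Int) (q : Int → Int → Bool) (best : Option (Int × Int)) (i : Int) :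
    Option (Int × Int) :=
  match ws.find? (fun w => q w i) with
  | none => best
  | some m =>
    match best with
    | none => some (m, i)
    | some b => if m > b.1 then some (m, i) else best

lemma pvBestB_eq_foldl (ws : List Int) (q : Int → Int → Bool) (I : List Int) :
    pvBestB ws q I = I.foldl (pvStep ws q) none := rfl

lemma pvFoldStep_none (ws : List Int) (q : Int → Int → Bool) :
    ∀ (I : List Int) (acc : Option (Int × Int)),
      (∀ i ∈ I, ws.find? (fun w => q w i) = none) →
      I.foldl (pvStep ws q) acc = acc := by
  intro I
  induction I with
  | nil => intro acc _; rfl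
  | cons i I ih =>
    intro acc h
    simp only [List.foldl_cons]
    rw [show pvStep ws q acc i = acc by unfold pvStep; rw [h i (by simp)]]
    exact ih acc (fun j hj => h j (by simp [hj]))

lemma pvFoldStep_keep (ws : List Int) (q : Int → Int → Bool) (w0 i0 : Int) :
    ∀ (I : List Int),
      (∀ i ∈ I, ∀ w, ws.find? (fun w => q w i) = some w → ¬ w > w0) →
      I.foldl (pvStep ws q) (some (w0, i0)) = some (w0, i0) := by
  intro I
  induction I with
  | nil => intro _; rfl
  | cons i I ih =>
    intro h
    simp only [List.foldl_cons]
    have : pvStep ws q (some (w0, i0)) i = some (w0, i0) := by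
      unfold pvStep
      cases hf : ws.find? (fun w => q w i) with
      | none => rfl
      | some m => simp only [if_neg (h i (by simp) m hf)]
    rw [this]
    exact ih (fun j hj => h j (by simp [hj]))

lemma pvFoldStep_small (ws : List Int) (q : Int → Int → Bool) (w0 : Int) :
    ∀ (I : List Int) (acc : Option (Int × Int)),
      (acc = none ∨ ∃ p, acc = some p ∧ p.1 < w0) →
      (∀ i ∈ I, ∀ w, ws.find? (fun w => q w i) = some w → w < w0) →
      (I.foldl (pvStep ws q) acc = none ∨
        ∃ p, I.foldl (pvStep ws q) acc = some p ∧ p.1 < w0) := by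
  intro I
  induction I with
  | nil => intro acc hacc _; exact hacc
  | cons i I ih =>
    intro acc hacc h
    simp only [List.foldl_cons]
    refine ih (pvStep ws q acc i) ?_ (fun j hj => h j (by simp [hj]))
    unfold pvStep
    cases hf : ws.find? (fun w => q w i) with
    | none => exact hacc
    | some m =>
      have hm : m < w0 := h i (by simp) m hf
      rcases hacc with hnone | ⟨p, hp, hlt⟩
      · subst hnone; exact Or.inr ⟨(m, i), rfl, hm⟩
      · subst hp
        by_cases hgt : m > p.1
        · simp only [if_pos hgt]; exact Or.inr ⟨(m, i), rfl, hm⟩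
        · simp only [if_neg hgt]; exact Or.inr ⟨p, rfl, hlt⟩

-- the central lemma: B's start-major fold finds the same pair as the
-- window-size-major first-match search, for a strictly decreasing size list
lemma pvBestB_eq (ws : List Int) (q : Int → Int → Bool) (I : List Int)
    (hws : ws.Pairwise (· > ·)) :
    pvBestB ws q I = ws.findSome? (fun w => (I.find? (q w)).map (fun i => (w, i))) := by
  rw [pvBestB_eq_foldl]
  induction ws with
  | nil =>
    rw [List.findSome?_nil]
    exact pvFoldStep_none [] q I none (fun i _ => rfl)
  | cons w ws ih =>
    have hhead : ∀ w' ∈ ws, w' < w := fun w' hw' => (List.pairwise_cons.1 hws).1 w' hw'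
    have hws' : ws.Pairwise (· > ·) := (List.pairwise_cons.1 hws).2
    rw [List.findSome?_cons]
    cases hI : I.find? (q w) with
    | some i0 =>
      obtain ⟨hqi0, I1, I2, hIsplit, hI1⟩ := List.find?_eq_some_iff_append.1 hI
      subst hIsplit
      rw [List.foldl_append, List.foldl_cons]
      have h1 : ∀ i ∈ I1, ∀ w', List.find? (fun w' => q w' i) (w :: ws) = some w' → w' < w := by
        intro i hi w' hfind
        have hqwi : q w i = false := by
          have := hI1 i hi; simpa using this
        rw [List.find?_cons_of_neg (by simp [hqwi])] at hfind
        exact hhead w' (List.mem_of_find?_eq_some hfind)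
      have hsmall := pvFoldStep_small (w :: ws) q w I1 none (Or.inl rfl) h1
      have hstep : pvStep (w :: ws) q (List.foldl (pvStep (w :: ws) q) none I1) i0 = some (w, i0) := by
        have hfind : List.find? (fun w' => q w' i0) (w :: ws) = some w := by
          rw [List.find?_cons_of_pos (by simpa using hqi0)]
        rcases hsmall with hnone | ⟨p, hp, hlt⟩
        · rw [hnone]; simp only [pvStep, hfind]
        · rw [hp]; simp only [pvStep, hfind]; rw [if_pos hlt]
      rw [hstep]
      have h2 : ∀ i ∈ I2, ∀ w', List.find? (fun w' => q w' i) (w :: ws) = some w' → ¬ w' > w := by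
        intro i _ w' hfind
        have := List.mem_of_find?_eq_some hfind
        rcases List.mem_cons.1 this with rfl | hmem
        · omega
        · have := hhead w' hmem; omega
      rw [pvFoldStep_keep (w :: ws) q w i0 I2 h2]
      rfl
    | none =>
      have hq : ∀ i ∈ I, q w i = false := by
        intro i hi
        have := List.find?_eq_none.1 hI i hi
        simpa using this
      have hcongr : List.foldl (pvStep (w :: ws) q) none I = List.foldl (pvStep ws q) none I := by
        apply PySem.List.foldl_congr_mem'
        intro i hi acc
        unfold pvStep
        rw [List.find?_cons_of_neg (by simp [hq i hi])]
      rw [hcongr, ih hws']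
      rfl

-- the two phase-1 searches look for the same (window, start) pair
lemma pvE1_eq (answer s : String) :
    (PySem.List.pyRange (min 200 (PySem.Str.len s)) 29 (-5)).findSome? (fun w =>
      ((PySem.List.pyRange 0 (PySem.Str.len s - w + 1) 1).find? (fun i =>
        decide (PySem.Str.find answer (PySem.Str.slice s (some i) (some (i + w))) ≠ -1))).map
      (fun i => (w, i))) =
    (PySem.List.pyRange (min 200 (PySem.Str.len s)) 29 (-5)).findSome? (fun w =>
      ((PySem.List.pyRange 0 (PySem.Str.len s) 1).find? (fun i =>
        decide (w ≤ PySem.Str.len s - i) &&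
          PySem.Str.isIn (PySem.Str.slice s (some i) (some (i + w))) answer)).map
      (fun i => (w, i))) := by
  apply pvFindSome?_congr
  intro w hw
  rw [PySem.List.mem_pyRange_iff_of_neg (by norm_num) w] at hw
  have hwL : w ≤ PySem.Str.len s := le_trans hw.2.1 (min_le_right _ _)
  refine congrArg _ ?_
  rw [pvFind?_pyRange_restrict 1 (by norm_num) (PySem.Str.len s) (PySem.Str.len s - w + 1)
    (by omega) (by omega)]
  apply pvFind?_congr
  intro i _
  rw [pvIsIn_eq answer (PySem.Str.slice s (some i) (some (i + w)))]
  rw [show (decide (i < PySem.Str.len s - w + 1)) = (decide (w ≤ PySem.Str.len s - i)) from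
    decide_eq_decide.2 (by omega)]

-- the two phase-2 searches look for the same (window, start) pair
set_option maxHeartbeats 1000000 in
lemma pvE2_eq (answer P : String) :
    (PySem.List.pyRange (min 300 (PySem.Str.len P)) 29 (-20)).findSome? (fun w =>
      ((PySem.List.pyRange 0 (PySem.Str.len P - w + 1) 10).find? (fun i =>
        decide (¬ PySem.Str.len (PySem.Str.strip (PySem.Str.slice P (some i) (some (i + w)))) < 40 ∧
          PySem.Str.find answer (PySem.Str.slice P (some i) (some (i + w))) ≠ -1))).map
      (fun i => (w, i))) =
    (PySem.List.pyRange (min 300 (PySem.Str.len P)) 29 (-20)).findSome? (fun w =>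
      ((PySem.List.pyRange 0 (PySem.Str.len P) 10).find? (fun i =>
        decide (w ≤ PySem.Str.len P - i) &&
          decide (40 ≤ PySem.Str.len (PySem.Str.strip (PySem.Str.slice P (some i) (some (i + w))))) &&
          PySem.Str.isIn (PySem.Str.slice P (some i) (some (i + w))) answer)).map
      (fun i => (w, i))) := by
  apply pvFindSome?_congr
  intro w hw
  rw [PySem.List.mem_pyRange_iff_of_neg (by norm_num) w] at hw
  have hwL : w ≤ PySem.Str.len P := le_trans hw.2.1 (min_le_right _ _)
  refine congrArg _ ?_
  rw [pvFind?_pyRange_restrict 10 (by norm_num) (PySem.Str.len P) (PySem.Str.len P - w + 1)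
    (by omega) (by omega)]
  apply pvFind?_congr
  intro i _
  rw [pvIsIn_eq answer (PySem.Str.slice P (some i) (some (i + w)))]
  rw [Bool.decide_and]
  rw [show (decide (i < PySem.Str.len P - w + 1)) = (decide (w ≤ PySem.Str.len P - i)) from
    decide_eq_decide.2 (by omega)]
  rw [show (decide (¬ PySem.Str.len (PySem.Str.strip (PySem.Str.slice P (some i) (some (i + w)))) < 40)) =
    (decide (40 ≤ PySem.Str.len (PySem.Str.strip (PySem.Str.slice P (some i) (some (i + w)))))) from
    decide_eq_decide.2 (by omega)]
  rw [Bool.and_assoc]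

-- ===== VERDICT (by name: the statement is the Claim_ definition above) =====
set_option maxHeartbeats 1000000 in
theorem find_char_matches_spec : Claim_equal_find_char_matches := by
  intro answer snippet prov _
  show find_char_matches answer snippet prov = find_char_matches_alt answer snippet prov
  simp only [find_char_matches, find_char_matches_alt]
  by_cases h0 : snippet = "" ∨ answer = ""
  · rw [if_pos h0, if_pos h0]
  · rw [if_neg h0, if_neg h0]
    by_cases h1 : PySem.Str.find answer snippet ≠ -1
    · rw [if_pos h1, if_pos h1]
    · rw [if_neg h1, if_neg h1]
      have hpos1 : ∀ w ∈ PySem.List.pyRange (min 200 (PySem.Str.len snippet)) 29 (-5), 0 < w := by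
        intro w hw
        rw [PySem.List.mem_pyRange_iff_of_neg (by norm_num) w] at hw
        omega
      rw [pvOuterA1_char answer snippet (PySem.Str.len snippet)
        (PySem.List.pyRange (min 200 (PySem.Str.len snippet)) 29 (-5)) ⟨-1, -1, 0, ""⟩ rfl hpos1]
      rw [pvE1_eq answer snippet]
      rw [pvBestB_eq _ _ _ (pvPairwise_gt_pyRange_neg (min 200 (PySem.Str.len snippet)) 29 (-5) (by norm_num))]
      cases hFS1 : (PySem.List.pyRange (min 200 (PySem.Str.len snippet)) 29 (-5)).findSome? (fun w =>
          ((PySem.List.pyRange 0 (PySem.Str.len snippet) 1).find? (fun i =>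
            decide (w ≤ PySem.Str.len snippet - i) &&
              PySem.Str.isIn (PySem.Str.slice snippet (some i) (some (i + w))) answer)).map
          (fun i => (w, i))) with
      | some wi =>
        obtain ⟨w, i⟩ := wi
        obtain ⟨w', hw'mem, hfw⟩ := List.exists_of_findSome?_eq_some hFS1
        obtain ⟨a, -, hfa⟩ := Option.map_eq_some_iff.1 hfw
        cases hfa
        rw [PySem.List.mem_pyRange_iff_of_neg (by norm_num) w] at hw'mem
        simp only [pvSel]
        rw [if_neg (show ¬ (w = 0) by omega), if_pos (show w ≠ 0 by omega)]
      | none =>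
        simp only [pvSel]
        rw [if_pos trivial]
        by_cases hP : prov.getD "" = ""
        · rw [if_pos hP, if_pos hP]; rfl
        · rw [if_neg hP, if_neg hP]
          have hpos2 : ∀ w ∈ PySem.List.pyRange (min 300 (PySem.Str.len (prov.getD ""))) 29 (-20), 0 < w := by
            intro w hw
            rw [PySem.List.mem_pyRange_iff_of_neg (by norm_num) w] at hw
            omega
          rw [pvOuterA2_char answer (prov.getD "")
            (PySem.List.pyRange (min 300 (PySem.Str.len (prov.getD ""))) 29 (-20)) ⟨-1, -1, 0, ""⟩ rfl hpos2]
          rw [pvE2_eq answer (prov.getD "")]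
          rw [pvBestB_eq _ _ _ (pvPairwise_gt_pyRange_neg (min 300 (PySem.Str.len (prov.getD ""))) 29 (-20) (by norm_num))]
          cases hFS2 : (PySem.List.pyRange (min 300 (PySem.Str.len (prov.getD ""))) 29 (-20)).findSome? (fun w =>
              ((PySem.List.pyRange 0 (PySem.Str.len (prov.getD "")) 10).find? (fun i =>
                decide (w ≤ PySem.Str.len (prov.getD "") - i) &&
                  decide (40 ≤ PySem.Str.len (PySem.Str.strip (PySem.Str.slice (prov.getD "") (some i) (some (i + w))))) &&
                  PySem.Str.isIn (PySem.Str.slice (prov.getD "") (some i) (some (i + w))) answer)).map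
              (fun i => (w, i))) with
          | some wi =>
            obtain ⟨w, i⟩ := wi
            obtain ⟨w', hw'mem, hfw⟩ := List.exists_of_findSome?_eq_some hFS2
            obtain ⟨a, -, hfa⟩ := Option.map_eq_some_iff.1 hfw
            cases hfa
            rw [PySem.List.mem_pyRange_iff_of_neg (by norm_num) w] at hw'mem
            simp only [pvSel]
            rw [if_pos (show w ≠ 0 by omega)]
          | none =>
            simp only [pvSel]
            rfl
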